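-- pv_equiv track=rewrite | github.com/cycleuser/ZhuShou | zhushou/tracker/github_issues.py | _priority_from_labels
-- ===== SOURCE A (Python) =====
-- def _priority_from_labels(labels: list[str]) -> int:
--     """Derive a numeric priority from well-known priority labels.
--
--     Returns 1 (urgent) through 4 (low), or 0 (unset) if no match.
--     """
--     lower = {lbl.lower() for lbl in labels}
--     if "priority: urgent" in lower or "p0" in lower:
--         return 1
--     if "priority: high" in lower or "p1" in lower:
--         return 2
--     if "priority: medium" in lower or "p2" in lower:
--         return 3
--     if "priority: low" in lower or "p3" in lower:
--         return 4
--     return 0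
-- ===== SOURCE B (Python) =====
-- _TABLE = {
--     "priority: urgent": 1, "p0": 1,
--     "priority: high": 2, "p1": 2,
--     "priority: medium": 3, "p2": 3,
--     "priority: low": 4, "p3": 4,
-- }
--
--
-- def _priority_from_labels(labels: list[str]) -> int:
--     """Derive a numeric priority from well-known priority labels.
--
--     Table lookup + min-reduction: the first matching tier in ascending
--     order is exactly the minimum matched priority value.
--     """
--     vals = [_TABLE[low] for lbl in labels if (low := lbl.lower()) in _TABLE]
--     return min(vals) if vals else 0
-- ===== Notes on version B (the rewrite author's own statement) =====
-- stated objective: simpler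
-- what changed: Replaced the four ordered membership branches over a lowered-label set by a label-to-priority lookup table and a single min-reduction over the matched values (0 if none matched), exploiting that first match in ascending tier order equals the minimum matched priority.
import Mathlib
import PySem

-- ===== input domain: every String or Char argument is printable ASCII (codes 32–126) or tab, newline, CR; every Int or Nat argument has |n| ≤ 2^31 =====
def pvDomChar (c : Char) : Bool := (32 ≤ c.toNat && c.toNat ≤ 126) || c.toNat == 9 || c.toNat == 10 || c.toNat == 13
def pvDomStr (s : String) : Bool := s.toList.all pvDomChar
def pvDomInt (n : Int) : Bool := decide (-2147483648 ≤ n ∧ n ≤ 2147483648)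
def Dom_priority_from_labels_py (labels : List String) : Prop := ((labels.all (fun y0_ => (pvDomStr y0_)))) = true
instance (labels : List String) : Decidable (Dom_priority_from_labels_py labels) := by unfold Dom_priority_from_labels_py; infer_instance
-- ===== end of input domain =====

-- B replaces A's four ordered membership branches by a label→priority table plus
-- a single min-reduction over the matched values (simpler decomposition; same cost).

-- ===== PORT A =====
def priority_from_labels_py (labels : List String) : Int :=
  let lower : PySem.Set String := PySem.Set.ofList (labels.map PySem.Str.lower)
  if "priority: urgent" ∈ lower ∨ "p0" ∈ lower then 1
  else if "priority: high" ∈ lower ∨ "p1" ∈ lower then 2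
  else if "priority: medium" ∈ lower ∨ "p2" ∈ lower then 3
  else if "priority: low" ∈ lower ∨ "p3" ∈ lower then 4
  else 0

-- ===== PORT B =====
def pvTable : PySem.Dict String Int := PySem.Dict.ofList
  [("priority: urgent", 1), ("p0", 1), ("priority: high", 2), ("p1", 2),
   ("priority: medium", 3), ("p2", 3), ("priority: low", 4), ("p3", 4)]

def priority_from_labels_py_alt (labels : List String) : Int :=
  let vals := labels.filterMap (fun lbl => pvTable.get? (PySem.Str.lower lbl))
  match PySem.List.min? vals (fun x => x) with
  | some m => m
  | none => 0

-- ===== PRECONDITION & SPEC =====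
def Spec_priority_from_labels_py (labels : List String) (out : Int) : Prop := out = priority_from_labels_py_alt labels
instance (labels : List String) (out : Int) : Decidable (Spec_priority_from_labels_py labels out) := by unfold Spec_priority_from_labels_py; infer_instance

-- ===== CLAIM (what is proved, stated in full; the proofs are below) =====
def Claim_equal_priority_from_labels_py : Prop := ∀ (labels : List String), Dom_priority_from_labels_py labels → Spec_priority_from_labels_py labels (priority_from_labels_py labels)

-- ===== LEMMAS AND PROOFS =====

theorem pvTable_mk : pvTable = PySem.Dict.mk
    [("priority: urgent", 1), ("p0", 1), ("priority: high", 2), ("p1", 2),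
     ("priority: medium", 3), ("p2", 3), ("priority: low", 4), ("p3", 4)] := by decide

theorem tget_one (a : String) : pvTable.get? a = some 1 ↔ a = "priority: urgent" ∨ a = "p0" := by
  rw [pvTable_mk]; simp only [PySem.Dict.get?_mk_cons, beq_iff_eq]
  split_ifs <;> simp_all [eq_comm, PySem.Dict.get?]

theorem tget_two (a : String) : pvTable.get? a = some 2 ↔ a = "priority: high" ∨ a = "p1" := by
  rw [pvTable_mk]; simp only [PySem.Dict.get?_mk_cons, beq_iff_eq]
  split_ifs <;> simp_all [eq_comm, PySem.Dict.get?]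

theorem tget_three (a : String) : pvTable.get? a = some 3 ↔ a = "priority: medium" ∨ a = "p2" := by
  rw [pvTable_mk]; simp only [PySem.Dict.get?_mk_cons, beq_iff_eq]
  split_ifs <;> simp_all [eq_comm, PySem.Dict.get?]

theorem tget_four (a : String) : pvTable.get? a = some 4 ↔ a = "priority: low" ∨ a = "p3" := by
  rw [pvTable_mk]; simp only [PySem.Dict.get?_mk_cons, beq_iff_eq]
  split_ifs <;> simp_all [eq_comm, PySem.Dict.get?]

theorem tget_range (a : String) (v : Int) (h : pvTable.get? a = some v) :
    v = 1 ∨ v = 2 ∨ v = 3 ∨ v = 4 := by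
  rw [pvTable_mk] at h; simp only [PySem.Dict.get?_mk_cons, beq_iff_eq] at h
  split_ifs at h <;> simp_all [PySem.Dict.get?]

theorem mem_vals (lows : List String) (v : Int) :
    v ∈ lows.filterMap pvTable.get? ↔ ∃ a ∈ lows, pvTable.get? a = some v := by
  simp [List.mem_filterMap]

theorem priority_eq (labels : List String) :
    priority_from_labels_py labels = priority_from_labels_py_alt labels := by
  unfold priority_from_labels_py priority_from_labels_py_alt
  simp only [PySem.Set.mem_ofList]
  rw [show (fun lbl => pvTable.get? (PySem.Str.lower lbl)) = (pvTable.get? ∘ PySem.Str.lower) from rfl,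
      ← List.filterMap_map]
  set lows := labels.map PySem.Str.lower with hlows
  set vals := lows.filterMap pvTable.get? with hvals
  have h1 : (1 : Int) ∈ vals ↔ ("priority: urgent" ∈ lows ∨ "p0" ∈ lows) := by
    rw [hvals, mem_vals]; constructor
    · rintro ⟨a, ha, hv⟩; rcases (tget_one a).mp hv with rfl | rfl
      · exact Or.inl ha
      · exact Or.inr ha
    · rintro (h | h)
      · exact ⟨_, h, (tget_one _).mpr (Or.inl rfl)⟩
      · exact ⟨_, h, (tget_one _).mpr (Or.inr rfl)⟩
  have h2 : (2 : Int) ∈ vals ↔ ("priority: high" ∈ lows ∨ "p1" ∈ lows) := by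
    rw [hvals, mem_vals]; constructor
    · rintro ⟨a, ha, hv⟩; rcases (tget_two a).mp hv with rfl | rfl
      · exact Or.inl ha
      · exact Or.inr ha
    · rintro (h | h)
      · exact ⟨_, h, (tget_two _).mpr (Or.inl rfl)⟩
      · exact ⟨_, h, (tget_two _).mpr (Or.inr rfl)⟩
  have h3 : (3 : Int) ∈ vals ↔ ("priority: medium" ∈ lows ∨ "p2" ∈ lows) := by
    rw [hvals, mem_vals]; constructor
    · rintro ⟨a, ha, hv⟩; rcases (tget_three a).mp hv with rfl | rfl
      · exact Or.inl ha
      · exact Or.inr ha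
    · rintro (h | h)
      · exact ⟨_, h, (tget_three _).mpr (Or.inl rfl)⟩
      · exact ⟨_, h, (tget_three _).mpr (Or.inr rfl)⟩
  have h4 : (4 : Int) ∈ vals ↔ ("priority: low" ∈ lows ∨ "p3" ∈ lows) := by
    rw [hvals, mem_vals]; constructor
    · rintro ⟨a, ha, hv⟩; rcases (tget_four a).mp hv with rfl | rfl
      · exact Or.inl ha
      · exact Or.inr ha
    · rintro (h | h)
      · exact ⟨_, h, (tget_four _).mpr (Or.inl rfl)⟩
      · exact ⟨_, h, (tget_four _).mpr (Or.inr rfl)⟩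
  have hrange : ∀ v ∈ vals, v = 1 ∨ v = 2 ∨ v = 3 ∨ v = 4 := by
    intro v hv
    obtain ⟨a, _, hv⟩ := (mem_vals lows v).mp hv
    exact tget_range a v hv
  by_cases c1 : "priority: urgent" ∈ lows ∨ "p0" ∈ lows
  · rw [if_pos c1]
    have hm : (1 : Int) ∈ vals := h1.mpr c1
    obtain ⟨m, hmin⟩ : ∃ m, PySem.List.min? vals (fun x => x) = some m := by
      cases heq : PySem.List.min? vals (fun x => x) with
      | none => exact absurd ((PySem.List.min?_eq_none_iff vals _).mp heq ▸ hm) (List.not_mem_nil)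
      | some m => exact ⟨m, rfl⟩
    have hle := PySem.List.min?_isMin hmin 1 hm
    have hr := hrange m (PySem.List.min?_mem hmin)
    simp only [hmin]; omega
  · rw [if_neg c1]
    have hn1 : (1 : Int) ∉ vals := fun h => c1 (h1.mp h)
    by_cases c2 : "priority: high" ∈ lows ∨ "p1" ∈ lows
    · rw [if_pos c2]
      have hm : (2 : Int) ∈ vals := h2.mpr c2
      obtain ⟨m, hmin⟩ : ∃ m, PySem.List.min? vals (fun x => x) = some m := by
        cases heq : PySem.List.min? vals (fun x => x) with
        | none => exact absurd ((PySem.List.min?_eq_none_iff vals _).mp heq ▸ hm) (List.not_mem_nil)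
        | some m => exact ⟨m, rfl⟩
      have hle := PySem.List.min?_isMin hmin 2 hm
      have hmem := PySem.List.min?_mem hmin
      have hr := hrange m hmem
      have : m ≠ 1 := fun h => hn1 (h ▸ hmem)
      simp only [hmin]; omega
    · rw [if_neg c2]
      have hn2 : (2 : Int) ∉ vals := fun h => c2 (h2.mp h)
      by_cases c3 : "priority: medium" ∈ lows ∨ "p2" ∈ lows
      · rw [if_pos c3]
        have hm : (3 : Int) ∈ vals := h3.mpr c3
        obtain ⟨m, hmin⟩ : ∃ m, PySem.List.min? vals (fun x => x) = some m := by
          cases heq : PySem.List.min? vals (fun x => x) with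
          | none => exact absurd ((PySem.List.min?_eq_none_iff vals _).mp heq ▸ hm) (List.not_mem_nil)
          | some m => exact ⟨m, rfl⟩
        have hle := PySem.List.min?_isMin hmin 3 hm
        have hmem := PySem.List.min?_mem hmin
        have hr := hrange m hmem
        have : m ≠ 1 := fun h => hn1 (h ▸ hmem)
        have : m ≠ 2 := fun h => hn2 (h ▸ hmem)
        simp only [hmin]; omega
      · rw [if_neg c3]
        have hn3 : (3 : Int) ∉ vals := fun h => c3 (h3.mp h)
        by_cases c4 : "priority: low" ∈ lows ∨ "p3" ∈ lows
        · rw [if_pos c4]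
          have hm : (4 : Int) ∈ vals := h4.mpr c4
          obtain ⟨m, hmin⟩ : ∃ m, PySem.List.min? vals (fun x => x) = some m := by
            cases heq : PySem.List.min? vals (fun x => x) with
            | none => exact absurd ((PySem.List.min?_eq_none_iff vals _).mp heq ▸ hm) (List.not_mem_nil)
            | some m => exact ⟨m, rfl⟩
          have hle := PySem.List.min?_isMin hmin 4 hm
          have hmem := PySem.List.min?_mem hmin
          have hr := hrange m hmem
          have : m ≠ 1 := fun h => hn1 (h ▸ hmem)
          have : m ≠ 2 := fun h => hn2 (h ▸ hmem)
          have : m ≠ 3 := fun h => hn3 (h ▸ hmem)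
          simp only [hmin]; omega
        · rw [if_neg c4]
          have hn4 : (4 : Int) ∉ vals := fun h => c4 (h4.mp h)
          have hnil : vals = [] := by
            apply List.eq_nil_iff_forall_not_mem.mpr
            intro v hv
            rcases hrange v hv with rfl | rfl | rfl | rfl
            · exact hn1 hv
            · exact hn2 hv
            · exact hn3 hv
            · exact hn4 hv
          rw [(PySem.List.min?_eq_none_iff vals _).mpr hnil]

-- ===== VERDICT (by name: the statement is the Claim_ definition above) =====
theorem priority_from_labels_py_spec : Claim_equal_priority_from_labels_py := by
  intro labels _
  unfold Spec_priority_from_labels_py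
  exact priority_eq labels
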